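-- pv_equiv track=rewrite | github.com/Yookaser/Algorithm_old | SWEA/D2/swea1959.py | cal_list
-- ===== SOURCE A (Python) =====
-- def cal_list(arr1, arr2): # arr2 배열 길이가 더 짧은 경우로 가정
--     dp = [0] * (len(arr1) - len(arr2) + 1) # 두 배열 곲의 값을 저장할 공간
--
--     for _ in range(len(arr1) - len(arr2) + 1): # 두 배열의 곱을 몇 번 반복할지
--         total = 0 # 곱의 값 저장할 변수
--
--         for i in range(len(arr2)): # 두 배열의 곱을 실행
--             total += arr1[_ + i] * arr2[i]
--
--         dp[_] = total # 곱의 값을 저장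
--
--     return max(dp)
-- ===== SOURCE B (Python) =====
-- def cal_list(arr1, arr2):
--     # Column-wise accumulation: iterate once over arr2, updating all window
--     # sums in lockstep, instead of recomputing each window's dot product.
--     width = len(arr1) - len(arr2) + 1
--     totals = [0] * width
--     for i, b in enumerate(arr2):
--         totals = [t + arr1[s + i] * b for s, t in enumerate(totals)]
--     return max(totals)
-- ===== Notes on version B (the rewrite author's own statement) =====
-- stated objective: alternative
-- what changed: B transposes the two loops: it sweeps arr2 once and updates all window sums in lockstep (a vector of accumulators), instead of A's per-window inner dot-product loop; same O(n*m) cost.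
import Mathlib
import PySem

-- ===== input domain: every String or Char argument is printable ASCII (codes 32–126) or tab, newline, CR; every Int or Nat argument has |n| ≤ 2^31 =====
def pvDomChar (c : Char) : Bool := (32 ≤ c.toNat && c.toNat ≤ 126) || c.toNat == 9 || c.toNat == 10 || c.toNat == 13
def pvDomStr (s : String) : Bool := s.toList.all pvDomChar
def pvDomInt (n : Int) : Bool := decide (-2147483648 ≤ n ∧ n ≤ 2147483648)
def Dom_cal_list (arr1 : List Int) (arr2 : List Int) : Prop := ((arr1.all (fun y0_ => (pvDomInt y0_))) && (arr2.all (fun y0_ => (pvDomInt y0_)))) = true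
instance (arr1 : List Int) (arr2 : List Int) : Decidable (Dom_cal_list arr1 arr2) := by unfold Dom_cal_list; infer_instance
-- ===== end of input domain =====

-- B transposes A's two loops: it sweeps arr2 once, updating all window sums in lockstep,
-- instead of A's per-window inner dot-product loop; same exact result, same O(n*m) cost.

-- ===== PORT A =====
def cal_list (arr1 : List Int) (arr2 : List Int) : Int :=
  -- dp[_] = total for _ in range(len(arr1)-len(arr2)+1); return max(dp)
  let dp := (PySem.List.pyRange 0 ((arr1.length : Int) - (arr2.length : Int) + 1) 1).map
    (fun s =>
      (PySem.List.pyRange 0 (arr2.length : Int) 1).foldl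
        (fun total i => total + PySem.List.pyGetD arr1 (s + i) 0 * PySem.List.pyGetD arr2 i 0) 0)
  (PySem.List.max? dp (fun y => y)).getD 0

-- ===== PORT B =====
def cal_list_alt (arr1 : List Int) (arr2 : List Int) : Int :=
  let width := ((arr1.length : Int) - (arr2.length : Int) + 1).toNat
  let totals := (PySem.List.enumerate arr2 0).foldl
    (fun totals ib =>
      (PySem.List.enumerate totals 0).map
        (fun st => st.2 + PySem.List.pyGetD arr1 (st.1 + ib.1) 0 * ib.2))
    (List.replicate width (0 : Int))
  (PySem.List.max? totals (fun y => y)).getD 0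

-- ===== PRECONDITION & SPEC =====
-- Pre_ excludes only the inputs where the Python A raises (max() of an empty dp when
-- len(arr2) > len(arr1)); B raises there too.
def Pre_cal_list (arr1 : List Int) (arr2 : List Int) : Prop := arr2.length ≤ arr1.length
instance (arr1 : List Int) (arr2 : List Int) : Decidable (Pre_cal_list arr1 arr2) := by unfold Pre_cal_list; infer_instance
def pvWitness_cal_list : List Int × List Int := ([1, 2, 3], [2, -1])

def Spec_cal_list (arr1 : List Int) (arr2 : List Int) (out : Int) : Prop := out = cal_list_alt arr1 arr2
instance (arr1 : List Int) (arr2 : List Int) (out : Int) : Decidable (Spec_cal_list arr1 arr2 out) := by unfold Spec_cal_list; infer_instance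

-- ===== CLAIM (what is proved, stated in full; the proofs are below) =====
def Claim_equal_cal_list : Prop := ∀ (arr1 : List Int) (arr2 : List Int), Dom_cal_list arr1 arr2 → Pre_cal_list arr1 arr2 → Spec_cal_list arr1 arr2 (cal_list arr1 arr2)

-- ===== LEMMAS AND PROOFS =====

-- partial dot product: sum of arr1[s+k+j]*b[j] over the remaining suffix b of arr2
def dotFrom (a : List Int) (b : List Int) (k : Int) (s : Int) : Int :=
  match b with
  | [] => 0
  | x :: xs => PySem.List.pyGetD a (s + k) 0 * x + dotFrom a xs (k + 1) s

-- A's inner loop over indices of arr2 computes dotFrom of the suffix past `pre`.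
theorem A_inner (a : List Int) (s : Int) :
    ∀ (suf pre : List Int) (acc : Int),
      (PySem.List.pyRange (pre.length : Int) ((pre.length : Int) + (suf.length : Int)) 1).foldl
        (fun total i => total + PySem.List.pyGetD a (s + i) 0 * PySem.List.pyGetD (pre ++ suf) i 0) acc
      = acc + dotFrom a suf (pre.length : Int) s := by
  intro suf
  induction suf with
  | nil =>
    intro pre acc
    rw [PySem.List.pyRange_one_eq_nil (by simp)]
    simp [dotFrom]
  | cons x xs ih =>
    intro pre acc
    rw [PySem.List.pyRange_one_cons (by simp)]
    simp only [List.foldl_cons]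
    have hx : PySem.List.pyGetD (pre ++ x :: xs) (pre.length : Int) 0 = x := by
      simp [PySem.List.pyGetD_natCast]
    rw [hx]
    have hlist : pre ++ x :: xs = (pre ++ [x]) ++ xs := by simp
    have hlen : ((pre.length : Int) + 1) = (((pre ++ [x]).length : Int)) := by simp
    have hlen2 : (pre.length : Int) + ((x :: xs).length : Int) = ((pre ++ [x]).length : Int) + (xs.length : Int) := by
      simp
      ring
    rw [hlist, hlen, hlen2, ih (pre ++ [x]) _]
    simp [dotFrom]
    ring

theorem enumerate_map {α β : Type} (f : α → β) :
    ∀ (l : List α) (s : Int),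
      PySem.List.enumerate (l.map f) s = (PySem.List.enumerate l s).map (fun p => (p.1, f p.2)) := by
  intro l
  induction l with
  | nil => intro s; simp [PySem.List.enumerate_nil]
  | cons x xs ih => intro s; simp [PySem.List.enumerate_cons, ih]

theorem enumerate_pyRange_aux :
    ∀ (n : Nat) (s b : Int), (b - s).toNat = n →
      PySem.List.enumerate (PySem.List.pyRange s b 1) s
        = (PySem.List.pyRange s b 1).map (fun j => (j, j)) := by
  intro n
  induction n with
  | zero =>
    intro s b h
    rw [PySem.List.pyRange_one_eq_nil (by omega)]
    simp [PySem.List.enumerate_nil]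
  | succ n ih =>
    intro s b h
    rw [PySem.List.pyRange_one_cons (by omega)]
    rw [PySem.List.enumerate_cons, List.map_cons]
    rw [ih (s + 1) b (by omega)]

theorem enumerate_pyRange (W : Int) :
    PySem.List.enumerate (PySem.List.pyRange 0 W 1) 0
      = (PySem.List.pyRange 0 W 1).map (fun j => (j, j)) :=
  enumerate_pyRange_aux (W - 0).toNat 0 W rfl

-- B's lockstep update: folding the enumerated suffix of arr2 over a totals vector of
-- shape (range W).map t adds dotFrom pointwise.
theorem B_fold (a : List Int) (W : Int) :
    ∀ (b : List Int) (k : Int) (t : Int → Int),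
      (PySem.List.enumerate b k).foldl
        (fun totals ib =>
          (PySem.List.enumerate totals 0).map
            (fun st => st.2 + PySem.List.pyGetD a (st.1 + ib.1) 0 * ib.2))
        ((PySem.List.pyRange 0 W 1).map t)
      = (PySem.List.pyRange 0 W 1).map (fun s => t s + dotFrom a b k s) := by
  intro b
  induction b with
  | nil => intro k t; simp [PySem.List.enumerate_nil, dotFrom]
  | cons x xs ih =>
    intro k t
    rw [PySem.List.enumerate_cons]
    simp only [List.foldl_cons]
    have hstep :
        (PySem.List.enumerate ((PySem.List.pyRange 0 W 1).map t) 0).map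
          (fun st => st.2 + PySem.List.pyGetD a (st.1 + k) 0 * x)
        = (PySem.List.pyRange 0 W 1).map (fun s => t s + PySem.List.pyGetD a (s + k) 0 * x) := by
      rw [enumerate_map, enumerate_pyRange, List.map_map, List.map_map]
      rfl
    rw [hstep, ih (k + 1) (fun s => t s + PySem.List.pyGetD a (s + k) 0 * x)]
    apply List.map_congr_left
    intro j _
    simp [dotFrom]
    ring

theorem dp_eq (arr1 arr2 : List Int) :
    (PySem.List.pyRange 0 ((arr1.length : Int) - (arr2.length : Int) + 1) 1).map
      (fun s =>
        (PySem.List.pyRange 0 (arr2.length : Int) 1).foldl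
          (fun total i => total + PySem.List.pyGetD arr1 (s + i) 0 * PySem.List.pyGetD arr2 i 0) 0)
    = (PySem.List.pyRange 0 ((arr1.length : Int) - (arr2.length : Int) + 1) 1).map
        (fun s => dotFrom arr1 arr2 0 s) := by
  apply List.map_congr_left
  intro s _
  have := A_inner arr1 s arr2 [] 0
  simpa using this

theorem totals_eq (arr1 arr2 : List Int) :
    (PySem.List.enumerate arr2 0).foldl
      (fun totals ib =>
        (PySem.List.enumerate totals 0).map
          (fun st => st.2 + PySem.List.pyGetD arr1 (st.1 + ib.1) 0 * ib.2))
      (List.replicate ((arr1.length : Int) - (arr2.length : Int) + 1).toNat (0 : Int))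
    = (PySem.List.pyRange 0 ((arr1.length : Int) - (arr2.length : Int) + 1) 1).map
        (fun s => dotFrom arr1 arr2 0 s) := by
  have hrep : List.replicate ((arr1.length : Int) - (arr2.length : Int) + 1).toNat (0 : Int)
      = (PySem.List.pyRange 0 ((arr1.length : Int) - (arr2.length : Int) + 1) 1).map (fun _ => (0 : Int)) := by
    rw [List.map_const']
    congr 1
    rw [PySem.List.length_pyRange_one]
    omega
  rw [hrep, B_fold arr1 _ arr2 0 (fun _ => 0)]
  simp

-- ===== VERDICT (by name: the statement is the Claim_ definition above) =====
theorem cal_list_spec : Claim_equal_cal_list := by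
  intro arr1 arr2 _ _
  unfold Spec_cal_list
  simp only [cal_list, cal_list_alt]
  rw [dp_eq, totals_eq]
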